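-- pv_equiv track=rewrite | github.com/1b0325h/ac-python | library/imos.py | imos
-- ===== SOURCE A (Python) =====
-- def imos(start, end, add):
--     """
--     >>> N, W = 4, 10
--     >>> S = [1, 2, 3, 2]
--     >>> T = [3, 4, 10, 4]
--     >>> P = [5, 4, 6, 1]
--     >>> max(imos(S, T, P)) <= W
--     False
--     >>> N, W = 4, 10
--     >>> S = [1, 2, 3, 2]
--     >>> T = [3, 4, 10, 3]
--     >>> P = [5, 4, 6, 1]
--     >>> max(imos(S, T, P)) <= W
--     True
--     """
--     table = [0] * (max(end)+2)
--     for i in range(len(start)):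
--         table[start[i]] += add[i]
--         table[end[i]] -= add[i]
--     for i in range(1, max(end)+2):
--         table[i] += table[i-1]
--     return table
-- ===== SOURCE B (Python) =====
-- def imos(start, end, add):
--     total = [0] * (max(end) + 2)
--     for s, e, a in zip(start, end, add):
--         total[s:] = [x + a for x in total[s:]]
--         total[e:] = [x - a for x in total[e:]]
--     return total
-- ===== Notes on version B (the rewrite author's own statement) =====
-- stated objective: alternative
-- what changed: Applies each range-add directly as two suffix slice-updates on the result (total[s:] gets +a, total[e:] gets -a) instead of recording point deltas in a difference array and then running an in-place prefix-sum pass; Pre_ excludes only inputs on which A raises (empty end -> ValueError, end/add shorter than start or a start index outside the table's index range -> IndexError).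
import Mathlib
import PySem

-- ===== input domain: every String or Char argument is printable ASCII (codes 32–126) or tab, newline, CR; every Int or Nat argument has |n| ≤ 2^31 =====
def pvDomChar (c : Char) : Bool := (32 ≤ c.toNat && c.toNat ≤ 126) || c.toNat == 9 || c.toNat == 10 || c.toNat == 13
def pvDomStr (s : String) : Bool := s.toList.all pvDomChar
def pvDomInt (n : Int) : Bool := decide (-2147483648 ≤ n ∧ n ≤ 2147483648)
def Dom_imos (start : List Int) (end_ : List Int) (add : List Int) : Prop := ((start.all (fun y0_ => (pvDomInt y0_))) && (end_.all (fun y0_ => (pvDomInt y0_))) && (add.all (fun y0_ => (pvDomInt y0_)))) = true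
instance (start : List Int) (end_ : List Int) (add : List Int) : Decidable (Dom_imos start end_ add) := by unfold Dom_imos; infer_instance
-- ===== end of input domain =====

-- B applies each range-add directly as two suffix slice-updates (add a from start on, subtract it
-- from end on) instead of recording point deltas in a difference array and prefix-summing it
-- ('alternative', not faster).

-- ===== PORT A =====
def imos (start : List Int) (end_ : List Int) (add : List Int) : List Int :=
  match PySem.List.max? end_ (fun x => x) with
  | none => []  -- max(end) raises ValueError on empty end: excluded by Pre_imos
  | some mx =>
    let table : List Int := List.replicate (mx + 2).toNat 0
    let table :=
      (PySem.List.pyRange 0 (PySem.List.len start) 1).foldl (fun t i =>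
        let t := PySem.List.pySetD t (PySem.List.pyGetD start i 0)
          (PySem.List.pyGetD t (PySem.List.pyGetD start i 0) 0 + PySem.List.pyGetD add i 0)
        PySem.List.pySetD t (PySem.List.pyGetD end_ i 0)
          (PySem.List.pyGetD t (PySem.List.pyGetD end_ i 0) 0 - PySem.List.pyGetD add i 0)) table
    (PySem.List.pyRange 1 (mx + 2) 1).foldl (fun t i =>
      PySem.List.pySetD t i (PySem.List.pyGetD t i 0 + PySem.List.pyGetD t (i - 1) 0)) table

-- ===== PORT B =====
-- exact port of the Python slice assignment `t[s:] = [f(x) for x in t[s:]]`: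
-- the kept prefix is t[:s] and the rewritten suffix t[s:], via PySem.List.slice (Python's clamping)
def pySufAssign (t : List Int) (s : Int) (f : Int → Int) : List Int :=
  PySem.List.slice t none (some s) ++ (PySem.List.slice t (some s) none).map f

def imos_alt (start : List Int) (end_ : List Int) (add : List Int) : List Int :=
  match PySem.List.max? end_ (fun x => x) with
  | none => []  -- max(end) raises ValueError on empty end
  | some mx =>
    (start.zip (end_.zip add)).foldl (fun t sea =>
        pySufAssign (pySufAssign t sea.1 (fun x => x + sea.2.2)) sea.2.1 (fun x => x - sea.2.2))
      (List.replicate (mx + 2).toNat 0)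

-- ===== PRECONDITION & SPEC =====
-- Pre_imos: exactly the inputs on which the Python A returns normally: end nonempty (else max
-- raises ValueError), add and end at least as long as start (else IndexError in the loop), and
-- every used start/end index within Python's index range for the table of length max(end)+2
-- (else IndexError).
def Pre_imos (start : List Int) (end_ : List Int) (add : List Int) : Prop :=
  end_ ≠ [] ∧ start.length ≤ end_.length ∧ start.length ≤ add.length ∧
  ∀ i ∈ List.range start.length,
    -(((PySem.List.max? end_ (fun x => x)).getD 0) + 2) ≤ start.getD i 0 ∧
    start.getD i 0 < ((PySem.List.max? end_ (fun x => x)).getD 0) + 2 ∧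
    -(((PySem.List.max? end_ (fun x => x)).getD 0) + 2) ≤ end_.getD i 0
instance (start : List Int) (end_ : List Int) (add : List Int) : Decidable (Pre_imos start end_ add) := by unfold Pre_imos; infer_instance

def pvWitness_imos : List Int × List Int × List Int := ([1, 2], [3, 4], [5, 4])

def Spec_imos (start : List Int) (end_ : List Int) (add : List Int) (out : List Int) : Prop := out = imos_alt start end_ add
instance (start : List Int) (end_ : List Int) (add : List Int) (out : List Int) : Decidable (Spec_imos start end_ add out) := by unfold Spec_imos; infer_instance

-- ===== CLAIM (what is proved, stated in full; the proofs are below) =====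
def Claim_equal_imos : Prop := ∀ (start : List Int) (end_ : List Int) (add : List Int), Dom_imos start end_ add → Pre_imos start end_ add → Spec_imos start end_ add (imos start end_ add)

-- ===== LEMMAS AND PROOFS =====

lemma sum_indicator (p : Nat) (s a : Int) (hs : 0 ≤ s) :
    ∑ q ∈ Finset.range (p + 1), (if s = (q : Int) then a else 0) = if s ≤ (p : Int) then a else 0 := by
  induction p with
  | zero =>
    simp only [Finset.sum_range_one, Nat.cast_zero]
    have h : s = 0 ↔ s ≤ 0 := by omega
    simp [h]
  | succ p ih =>
    rw [Finset.sum_range_succ, ih]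
    push_cast
    split_ifs <;> omega

lemma swap_sum (n p : Nat) (S E A : Nat → Int)
    (hS : ∀ i < n, 0 ≤ S i) (hE : ∀ i < n, 0 ≤ E i) :
    ∑ q ∈ Finset.range (p + 1), ∑ i ∈ Finset.range n,
        ((if S i = (q : Int) then A i else 0) - (if E i = (q : Int) then A i else 0))
    = ∑ i ∈ Finset.range n, A i * ((if S i ≤ (p : Int) then 1 else 0) - (if E i ≤ (p : Int) then 1 else 0)) := by
  rw [Finset.sum_comm]
  refine Finset.sum_congr rfl ?_
  intro i hi
  rw [Finset.sum_sub_distrib]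
  rw [sum_indicator p (S i) (A i) (hS i (Finset.mem_range.mp hi))]
  rw [sum_indicator p (E i) (A i) (hE i (Finset.mem_range.mp hi))]
  split_ifs <;> ring

-- Python's index normalization (negative wrap) on the admitted range is exactly mod.
lemma pyIdx?_mod (n : Nat) (i : Int) (h0 : -(n : Int) ≤ i) (h1 : i < (n : Int)) :
    PySem.List.pyIdx? n i = some (PySem.Int.mod i (n : Int)).toNat := by
  have hn : 0 < (n : Int) := by omega
  rw [PySem.Int.mod_eq_emod_of_pos hn]
  unfold PySem.List.pyIdx?
  by_cases ha : 0 ≤ i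
  · rw [if_pos ha, if_pos h1, Int.emod_eq_of_lt ha h1]
  · rw [if_neg ha, if_pos h0]
    have hmod : i % (n : Int) = i + n := by
      have h2 : (i + n) % (n : Int) = i % (n : Int) := Int.add_emod_right i n
      rw [← h2, Int.emod_eq_of_lt (by omega) (by omega)]
    rw [hmod]
    congr 1
    omega

lemma pySetD_mod (t : List Int) (i : Int) {v : Int} (h0 : -(t.length : Int) ≤ i) (h1 : i < (t.length : Int)) :
    PySem.List.pySetD t i v = t.set (PySem.Int.mod i (t.length : Int)).toNat v := by
  unfold PySem.List.pySetD PySem.List.pySet?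
  rw [pyIdx?_mod _ _ h0 h1]
  rfl

lemma pyGetD_mod (t : List Int) (i : Int) (h0 : -(t.length : Int) ≤ i) (h1 : i < (t.length : Int)) :
    PySem.List.pyGetD t i 0 = t.getD (PySem.Int.mod i (t.length : Int)).toNat 0 := by
  unfold PySem.List.pyGetD PySem.List.pyGet?
  rw [pyIdx?_mod _ _ h0 h1]
  simp [List.getD_eq_getElem?_getD]

-- One iteration of A's first loop, cell by cell.
lemma step_cell (r : List Int) (s e a : Int)
    (hs0 : -(r.length : Int) ≤ s) (hs1 : s < (r.length : Int))
    (he0 : -(r.length : Int) ≤ e) (he1 : e < (r.length : Int)) (p : Nat) :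
    (PySem.List.pySetD (PySem.List.pySetD r s (PySem.List.pyGetD r s 0 + a)) e
      (PySem.List.pyGetD (PySem.List.pySetD r s (PySem.List.pyGetD r s 0 + a)) e 0 - a)).getD p 0
    = r.getD p 0 + ((if PySem.Int.mod s (r.length : Int) = (p : Int) then a else 0)
        - (if PySem.Int.mod e (r.length : Int) = (p : Int) then a else 0)) := by
  have hlen : 0 < (r.length : Int) := by omega
  have hms0 : 0 ≤ PySem.Int.mod s (r.length : Int) := PySem.Int.mod_nonneg s hlen
  have hms1 : PySem.Int.mod s (r.length : Int) < (r.length : Int) := PySem.Int.mod_lt s hlen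
  have hme0 : 0 ≤ PySem.Int.mod e (r.length : Int) := PySem.Int.mod_nonneg e hlen
  have hme1 : PySem.Int.mod e (r.length : Int) < (r.length : Int) := PySem.Int.mod_lt e hlen
  rw [pyGetD_mod r s hs0 hs1, pySetD_mod r s hs0 hs1]
  rw [pyGetD_mod _ e (by simpa using he0) (by simpa using he1),
      pySetD_mod _ e (by simpa using he0) (by simpa using he1)]
  simp only [List.length_set]
  set ms := PySem.Int.mod s (r.length : Int) with hmsd
  set me := PySem.Int.mod e (r.length : Int) with hmed
  have hsn : ms.toNat < r.length := by omega
  have hen : me.toNat < r.length := by omega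
  have hseq : (ms = (p : Int)) ↔ (ms.toNat = p) := by omega
  have heeq : (me = (p : Int)) ↔ (me.toNat = p) := by omega
  simp only [List.getD_eq_getElem?_getD, List.getElem?_set, List.length_set, hseq, heeq]
  by_cases hp : p < r.length
  · split_ifs <;> simp_all <;> omega
  · have h1 : ¬ ms.toNat = p := by omega
    have h2 : ¬ me.toNat = p := by omega
    have h3 : r[p]? = none := by rw [List.getElem?_eq_none_iff]; omega
    simp [h1, h2, h3]

lemma step_len (r : List Int) (s e a : Int) :
    (PySem.List.pySetD (PySem.List.pySetD r s (PySem.List.pyGetD r s 0 + a)) e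
      (PySem.List.pyGetD (PySem.List.pySetD r s (PySem.List.pyGetD r s 0 + a)) e 0 - a)).length
    = r.length := by
  simp [PySem.List.length_pySetD]

-- A's first loop: the difference table it builds, cell by cell.
lemma diff_loop (start end_ add : List Int) (N : Nat) (n : Nat)
    (hn : n ≤ start.length) (hne : n ≤ end_.length) (hna : n ≤ add.length)
    (hs : ∀ i < n, -(N : Int) ≤ start.getD i 0 ∧ start.getD i 0 < (N : Int))
    (he : ∀ i < n, -(N : Int) ≤ end_.getD i 0 ∧ end_.getD i 0 < (N : Int))
    (t : List Int) (ht : t.length = N) :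
    ((PySem.List.pyRange 0 (n : Int) 1).foldl (fun t i =>
        let t := PySem.List.pySetD t (PySem.List.pyGetD start i 0)
          (PySem.List.pyGetD t (PySem.List.pyGetD start i 0) 0 + PySem.List.pyGetD add i 0)
        PySem.List.pySetD t (PySem.List.pyGetD end_ i 0)
          (PySem.List.pyGetD t (PySem.List.pyGetD end_ i 0) 0 - PySem.List.pyGetD add i 0)) t).length = N ∧
    ∀ p : Nat, p < N →
      ((PySem.List.pyRange 0 (n : Int) 1).foldl (fun t i =>
        let t := PySem.List.pySetD t (PySem.List.pyGetD start i 0)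
          (PySem.List.pyGetD t (PySem.List.pyGetD start i 0) 0 + PySem.List.pyGetD add i 0)
        PySem.List.pySetD t (PySem.List.pyGetD end_ i 0)
          (PySem.List.pyGetD t (PySem.List.pyGetD end_ i 0) 0 - PySem.List.pyGetD add i 0)) t).getD p 0
      = t.getD p 0 + ∑ i ∈ Finset.range n,
          ((if PySem.Int.mod (start.getD i 0) (N : Int) = (p : Int) then add.getD i 0 else 0)
           - (if PySem.Int.mod (end_.getD i 0) (N : Int) = (p : Int) then add.getD i 0 else 0)) := by
  induction n with
  | zero =>
    rw [show ((0 : Nat) : Int) = 0 by norm_num, PySem.List.pyRange_one_eq_nil (by norm_num)]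
    simp [ht]
  | succ n ih =>
    obtain ⟨hl, hcell⟩ := ih (by omega) (by omega) (by omega)
      (fun i hi => hs i (by omega)) (fun i hi => he i (by omega))
    have hsplit : PySem.List.pyRange 0 ((n + 1 : Nat) : Int)
        = PySem.List.pyRange 0 (n : Int) ++ [(n : Int)] := by
      have := PySem.List.pyRange_one_succ_right (a := 0) (b := (n : Int)) (by positivity)
      push_cast
      exact this
    rw [hsplit, List.foldl_append]
    set r := (PySem.List.pyRange 0 (n : Int) 1).foldl (fun t i =>
        let t := PySem.List.pySetD t (PySem.List.pyGetD start i 0)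
          (PySem.List.pyGetD t (PySem.List.pyGetD start i 0) 0 + PySem.List.pyGetD add i 0)
        PySem.List.pySetD t (PySem.List.pyGetD end_ i 0)
          (PySem.List.pyGetD t (PySem.List.pyGetD end_ i 0) 0 - PySem.List.pyGetD add i 0)) t with hr
    simp only [List.foldl_cons, List.foldl_nil]
    rw [PySem.List.pyGetD_natCast start, PySem.List.pyGetD_natCast end_, PySem.List.pyGetD_natCast add]
    obtain ⟨hs0, hs1⟩ := hs n (by omega)
    obtain ⟨he0, he1⟩ := he n (by omega)
    constructor
    · rw [step_len]; exact hl
    · intro p hp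
      rw [step_cell r _ _ _ (by rw [hl]; exact hs0) (by rw [hl]; exact hs1)
        (by rw [hl]; exact he0) (by rw [hl]; exact he1) p]
      rw [hcell p hp, Finset.sum_range_succ, hl]
      ring

-- A's second loop: in-place prefix sums.
lemma prefix_loop (N : Nat) (k : Nat) (hk : k ≤ N) (t : List Int) (ht : t.length = N) :
    ((PySem.List.pyRange 1 (k : Int) 1).foldl (fun t i =>
        PySem.List.pySetD t i (PySem.List.pyGetD t i 0 + PySem.List.pyGetD t (i - 1) 0)) t).length = N ∧
    (∀ p : Nat, p < k →
      ((PySem.List.pyRange 1 (k : Int) 1).foldl (fun t i =>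
        PySem.List.pySetD t i (PySem.List.pyGetD t i 0 + PySem.List.pyGetD t (i - 1) 0)) t).getD p 0
      = ∑ q ∈ Finset.range (p + 1), t.getD q 0) ∧
    (∀ p : Nat, k ≤ p → p < N →
      ((PySem.List.pyRange 1 (k : Int) 1).foldl (fun t i =>
        PySem.List.pySetD t i (PySem.List.pyGetD t i 0 + PySem.List.pyGetD t (i - 1) 0)) t).getD p 0
      = t.getD p 0) := by
  induction k with
  | zero =>
    rw [PySem.List.pyRange_one_eq_nil (by norm_num)]
    exact ⟨ht, fun p hp => absurd hp (Nat.not_lt_zero p), fun p _ _ => rfl⟩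
  | succ k ih =>
    rcases Nat.eq_zero_or_pos k with hk0 | hk1
    · subst hk0
      rw [show ((1 : Nat) : Int) = 1 by norm_num, PySem.List.pyRange_one_eq_nil (by norm_num)]
      simp only [List.foldl_nil]
      refine ⟨ht, ?_, ?_⟩
      · intro p hp
        interval_cases p
        simp
      · intro p _ _
        trivial
    · obtain ⟨hl, hin, hout⟩ := ih (Nat.le_of_succ_le hk)
      have hsplit : PySem.List.pyRange 1 ((k + 1 : Nat) : Int)
          = PySem.List.pyRange 1 (k : Int) ++ [(k : Int)] := by
        have := PySem.List.pyRange_one_succ_right (a := 1) (b := (k : Int)) (by exact_mod_cast hk1)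
        push_cast
        exact this
      rw [hsplit, List.foldl_append]
      set r := (PySem.List.pyRange 1 (k : Int) 1).foldl (fun t i =>
        PySem.List.pySetD t i (PySem.List.pyGetD t i 0 + PySem.List.pyGetD t (i - 1) 0)) t with hr
      simp only [List.foldl_cons, List.foldl_nil]
      have hsub : ((k : Int) - 1) = ((k - 1 : Nat) : Int) := by omega
      rw [hsub]
      rw [PySem.List.pySetD_natCast, PySem.List.pyGetD_natCast, PySem.List.pyGetD_natCast]
      have hkN : k < N := hk
      have hval1 : r.getD k 0 = t.getD k 0 := hout k (le_refl k) hkN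
      have hval2 : r.getD (k - 1) 0 = ∑ q ∈ Finset.range k, t.getD q 0 := by
        have := hin (k - 1) (by omega)
        rwa [Nat.sub_add_cancel hk1] at this
      refine ⟨by simpa using hl, ?_, ?_⟩
      · intro p hp
        rcases Nat.lt_succ_iff_lt_or_eq.mp hp with hlt | heq
        · rw [List.getD_eq_getElem?_getD, List.getElem?_set_ne (by omega), ← List.getD_eq_getElem?_getD]
          exact hin p hlt
        · subst heq
          rw [List.getD_eq_getElem?_getD, List.getElem?_set_self (by omega), Option.getD_some]
          rw [hval1, hval2, Finset.sum_range_succ]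
          ring
      · intro p hp hpN
        rw [List.getD_eq_getElem?_getD, List.getElem?_set_ne (by omega), ← List.getD_eq_getElem?_getD]
        exact hout p (by omega) hpN

-- B's suffix slice-assignment, length and cell by cell.
lemma length_pySufAssign (t : List Int) (s : Int) (f : Int → Int) :
    (pySufAssign t s f).length = t.length := by
  unfold pySufAssign
  rw [PySem.List.slice_some_none]
  simp [PySem.List.slice, PySem.List.clampIdx_le]

lemma getD_pySufAssign (t : List Int) (s : Int) (f : Int → Int) (p : Nat) :
    (pySufAssign t s f).getD p 0
    = if PySem.List.clampIdx t.length s ≤ p ∧ p < t.length then f (t.getD p 0) else t.getD p 0 := by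
  unfold pySufAssign
  rw [PySem.List.slice_some_none]
  have hpre : PySem.List.slice t none (some s) = t.take (PySem.List.clampIdx t.length s) := by
    simp [PySem.List.slice]
  rw [hpre]
  set k := PySem.List.clampIdx t.length s with hk
  have hkle : k ≤ t.length := PySem.List.clampIdx_le _ _
  by_cases hp : p < t.length
  · by_cases hks : k ≤ p
    · rw [if_pos ⟨hks, hp⟩]
      rw [List.getD_eq_getElem?_getD, List.getElem?_append_right (by simp [hkle]; omega)]
      simp only [List.length_take, Nat.min_eq_left hkle]
      rw [List.getElem?_map, List.getElem?_drop]
      rw [show k + (p - k) = p by omega, List.getElem?_eq_getElem hp]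
      simp [List.getD_eq_getElem?_getD, List.getElem?_eq_getElem hp]
    · rw [if_neg (by tauto)]
      rw [List.getD_eq_getElem?_getD, List.getElem?_append_left (by simp [hkle]; omega)]
      rw [List.getElem?_take_of_lt (by omega), ← List.getD_eq_getElem?_getD]
  · rw [if_neg (by tauto)]
    have hlen : (t.take k ++ (t.drop k).map f).length = t.length := by
      simp [hkle]
    rw [List.getD_eq_getElem?_getD, List.getElem?_eq_none_iff.mpr (by omega),
        List.getD_eq_getElem?_getD, List.getElem?_eq_none_iff.mpr (by omega)]

-- B's loop over the zipped intervals: each cell accumulates both suffix updates.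
lemma b_loop (start end_ add : List Int) (N : Nat)
    (h1 : start.length ≤ end_.length) (h2 : start.length ≤ add.length)
    (t : List Int) (ht : t.length = N) :
    ((start.zip (end_.zip add)).foldl (fun t sea =>
        pySufAssign (pySufAssign t sea.1 (fun x => x + sea.2.2)) sea.2.1 (fun x => x - sea.2.2)) t).length = N ∧
    ∀ p : Nat, p < N →
      ((start.zip (end_.zip add)).foldl (fun t sea =>
        pySufAssign (pySufAssign t sea.1 (fun x => x + sea.2.2)) sea.2.1 (fun x => x - sea.2.2)) t).getD p 0
      = t.getD p 0 + ∑ i ∈ Finset.range start.length,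
          (add.getD i 0) * ((if PySem.List.clampIdx N (start.getD i 0) ≤ p then 1 else 0)
            - (if PySem.List.clampIdx N (end_.getD i 0) ≤ p then 1 else 0)) := by
  induction start generalizing end_ add t with
  | nil => simp [ht]
  | cons s st ih =>
    cases end_ with
    | nil => simp at h1
    | cons e et =>
      cases add with
      | nil => simp at h2
      | cons a at_ =>
        simp only [List.zip_cons_cons, List.foldl_cons, List.length_cons]
        set t' := pySufAssign (pySufAssign t s (fun x => x + a)) e (fun x => x - a) with ht'
        have hlen' : t'.length = N := by
          rw [ht', length_pySufAssign, length_pySufAssign, ht]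
        obtain ⟨hL, hC⟩ := ih et at_ (by simpa using h1) (by simpa using h2) t' hlen'
        refine ⟨hL, ?_⟩
        intro p hp
        rw [hC p hp]
        have hcell : t'.getD p 0 = t.getD p 0
            + ((if PySem.List.clampIdx N s ≤ p then a else 0)
              - (if PySem.List.clampIdx N e ≤ p then a else 0)) := by
          rw [ht', getD_pySufAssign, getD_pySufAssign, length_pySufAssign, ht]
          have hp' : p < N := hp
          by_cases h1' : PySem.List.clampIdx N s ≤ p <;>
            by_cases h2' : PySem.List.clampIdx N e ≤ p <;>
              simp [h1', h2', hp'] <;> ring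
        rw [hcell, Finset.sum_range_succ']
        simp only [List.getD_cons_succ, List.getD_cons_zero]
        have : (a : Int) * ((if PySem.List.clampIdx N s ≤ p then 1 else 0)
            - (if PySem.List.clampIdx N e ≤ p then 1 else 0))
            = ((if PySem.List.clampIdx N s ≤ p then a else 0)
              - (if PySem.List.clampIdx N e ≤ p then a else 0)) := by
          split_ifs <;> ring
        rw [this]
        ring

-- On A's admitted index range, Python's slice-start clamp and index wrap agree.
lemma clampIdx_eq_mod (N : Nat) (x : Int) (h0 : -(N : Int) ≤ x) (h1 : x < (N : Int)) :
    (PySem.List.clampIdx N x : Int) = PySem.Int.mod x (N : Int) := by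
  have hN : 0 < (N : Int) := by omega
  rw [PySem.Int.mod_eq_emod_of_pos hN]
  unfold PySem.List.clampIdx
  by_cases hx : x < 0
  · rw [if_pos hx, if_neg (by omega)]
    have : x % (N : Int) = x + N := by
      have h2 : (x + N) % (N : Int) = x % (N : Int) := Int.add_emod_right x N
      rw [← h2, Int.emod_eq_of_lt (by omega) (by omega)]
    omega
  · rw [if_neg hx]
    rw [Int.emod_eq_of_lt (by omega) h1]
    omega

-- ===== VERDICT (by name: the statement is the Claim_ definition above) =====
theorem imos_spec : Claim_equal_imos := by
  intro start end_ add _ hpre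
  unfold Spec_imos
  obtain ⟨hne, hlen_e, hlen_a, hidx⟩ := hpre
  obtain ⟨mx, hmx⟩ : ∃ mx, PySem.List.max? end_ (fun x => x) = some mx := by
    cases h : PySem.List.max? end_ (fun x => x) with
    | none => exact absurd ((PySem.List.max?_eq_none_iff end_ _).mp h) hne
    | some m => exact ⟨m, rfl⟩
  have hidx' : ∀ i < start.length,
      -(mx + 2) ≤ start.getD i 0 ∧ start.getD i 0 < mx + 2 ∧ -(mx + 2) ≤ end_.getD i 0 := by
    intro i hi
    have h := hidx i (List.mem_range.mpr hi)
    simpa only [hmx, Option.getD_some] using h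
  unfold imos imos_alt
  rw [hmx]
  dsimp only
  by_cases hL : mx + 2 ≤ 0
  · -- degenerate: the table is empty; Pre_ then forces start = [] and both sides are []
    have hstart : start = [] := by
      cases hst : start with
      | nil => rfl
      | cons s tl =>
        have h := hidx' 0 (by rw [hst]; simp)
        omega
    subst hstart
    rw [PySem.List.pyRange_one_eq_nil (show (mx + 2 : Int) ≤ 1 by omega),
        PySem.List.pyRange_one_eq_nil (show PySem.List.len ([] : List Int) ≤ 0 by simp [PySem.List.len_eq])]
    simp
  · push_neg at hL
    have hNc : (((mx + 2).toNat : Nat) : Int) = mx + 2 := by omega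
    have hsb : ∀ i < start.length,
        -((((mx + 2).toNat : Nat) : Int)) ≤ start.getD i 0 ∧ start.getD i 0 < (((mx + 2).toNat : Nat) : Int) := by
      intro i hi
      have h1 := (hidx' i hi).1
      have h2 := (hidx' i hi).2.1
      omega
    have heb : ∀ i < start.length,
        -((((mx + 2).toNat : Nat) : Int)) ≤ end_.getD i 0 ∧ end_.getD i 0 < (((mx + 2).toNat : Nat) : Int) := by
      intro i hi
      have hie : i < end_.length := lt_of_lt_of_le hi hlen_e
      have hgd : end_.getD i 0 = end_[i] := List.getD_eq_getElem end_ 0 hie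
      have h1 := (hidx' i hi).2.2
      have hmem : end_[i] ∈ end_ := List.getElem_mem hie
      have hle := PySem.List.max?_isMax hmx _ hmem
      simp only [] at hle
      omega
    obtain ⟨h1len, h1cell⟩ := diff_loop start end_ add (mx + 2).toNat start.length
      (le_refl _) hlen_e hlen_a hsb heb (List.replicate (mx + 2).toNat 0) (by simp)
    rw [show PySem.List.len start = ((start.length : Nat) : Int) from PySem.List.len_eq start]
    set t1 := (PySem.List.pyRange 0 ((start.length : Nat) : Int) 1).foldl (fun t i =>
        let t := PySem.List.pySetD t (PySem.List.pyGetD start i 0)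
          (PySem.List.pyGetD t (PySem.List.pyGetD start i 0) 0 + PySem.List.pyGetD add i 0)
        PySem.List.pySetD t (PySem.List.pyGetD end_ i 0)
          (PySem.List.pyGetD t (PySem.List.pyGetD end_ i 0) 0 - PySem.List.pyGetD add i 0))
        (List.replicate (mx + 2).toNat 0) with ht1
    obtain ⟨h2len, h2in, h2out⟩ := prefix_loop (mx + 2).toNat (mx + 2).toNat (le_refl _) t1 h1len
    rw [show (mx + 2 : Int) = (((mx + 2).toNat : Nat) : Int) from hNc.symm]
    simp only [Int.toNat_natCast]
    obtain ⟨hBlen, hBcell⟩ := b_loop start end_ add (mx + 2).toNat hlen_e hlen_a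
      (List.replicate (mx + 2).toNat 0) (by simp)
    apply List.ext_getElem
    · rw [h2len, hBlen]
    · intro p hpA hpB
      have hpN : p < (mx + 2).toNat := by rwa [h2len] at hpA
      have hA : (((PySem.List.pyRange 1 (((mx + 2).toNat : Nat) : Int) 1).foldl (fun t i =>
            PySem.List.pySetD t i (PySem.List.pyGetD t i 0 + PySem.List.pyGetD t (i - 1) 0)) t1)).getD p 0
          = ∑ q ∈ Finset.range (p + 1), t1.getD q 0 := h2in p hpN
      have hcells : ∀ q : Nat, q < (mx + 2).toNat → t1.getD q 0
          = ∑ i ∈ Finset.range start.length,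
              ((if PySem.Int.mod (start.getD i 0) (((mx + 2).toNat : Nat) : Int) = (q : Int) then add.getD i 0 else 0)
               - (if PySem.Int.mod (end_.getD i 0) (((mx + 2).toNat : Nat) : Int) = (q : Int) then add.getD i 0 else 0)) := by
        intro q hq
        have h := h1cell q hq
        simpa using h
      have hL' : 0 < ((((mx + 2).toNat : Nat)) : Int) := by omega
      have hsum : ∑ q ∈ Finset.range (p + 1), t1.getD q 0
          = ∑ i ∈ Finset.range start.length,
              (add.getD i 0) * ((if PySem.Int.mod (start.getD i 0) (((mx + 2).toNat : Nat) : Int) ≤ (p : Int) then 1 else 0)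
                - (if PySem.Int.mod (end_.getD i 0) (((mx + 2).toNat : Nat) : Int) ≤ (p : Int) then 1 else 0)) := by
        rw [Finset.sum_congr rfl (fun q hq => hcells q (by
          have := Finset.mem_range.mp hq; omega))]
        exact swap_sum start.length p _ _ _
          (fun i _ => PySem.Int.mod_nonneg _ hL') (fun i _ => PySem.Int.mod_nonneg _ hL')
      have hBp : (((start.zip (end_.zip add)).foldl (fun t sea =>
            pySufAssign (pySufAssign t sea.1 (fun x => x + sea.2.2)) sea.2.1 (fun x => x - sea.2.2))
            (List.replicate (mx + 2).toNat 0))).getD p 0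
          = ∑ i ∈ Finset.range start.length,
              (add.getD i 0) * ((if PySem.List.clampIdx (mx + 2).toNat (start.getD i 0) ≤ p then 1 else 0)
                - (if PySem.List.clampIdx (mx + 2).toNat (end_.getD i 0) ≤ p then 1 else 0)) := by
        rw [hBcell p hpN]
        simp
      have hgetA : ∀ (l : List Int) (h : p < l.length), l[p] = l.getD p 0 := by
        intro l h
        rw [List.getD_eq_getElem?_getD, List.getElem?_eq_getElem h, Option.getD_some]
      rw [hgetA _ hpA, hgetA _ hpB, hA, hsum, hBp]
      refine Finset.sum_congr rfl ?_
      intro i hi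
      have hm := Finset.mem_range.mp hi
      have hcs := clampIdx_eq_mod (mx + 2).toNat (start.getD i 0)
        (by have := (hsb i hm).1; omega) (by have := (hsb i hm).2; omega)
      have hce := clampIdx_eq_mod (mx + 2).toNat (end_.getD i 0)
        (by have := (heb i hm).1; omega) (by have := (heb i hm).2; omega)
      have hs' : (PySem.List.clampIdx (mx + 2).toNat (start.getD i 0) ≤ p)
          ↔ (PySem.Int.mod (start.getD i 0) (((mx + 2).toNat : Nat) : Int) ≤ (p : Int)) := by
        rw [← hcs]; exact_mod_cast Iff.rfl
      have he' : (PySem.List.clampIdx (mx + 2).toNat (end_.getD i 0) ≤ p)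
          ↔ (PySem.Int.mod (end_.getD i 0) (((mx + 2).toNat : Nat) : Int) ≤ (p : Int)) := by
        rw [← hce]; exact_mod_cast Iff.rfl
      simp only [hs', he']
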